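-- pv_equiv track=rewrite | github.com/ermancekic/CVulnPredictor | src/modules/calculate_results.py | _find_param_span
-- ===== SOURCE A (Python) =====
-- def _find_param_span(sig: str) -> tuple[int, int] | tuple[None, None]:
--     """
--     Returns the (start, end) indices of the top-level parameter list in sig,
--     i.e., the parentheses of the function call signature. If none found, (None, None).
--     This walks backward from the last ')' to find the matching '('.
--     """
--     if not sig:
--         return (None, None)
--     s = sig.strip()
--     rp = s.rfind(')')
--     if rp == -1:
--         return (None, None)
--     depth = 0
--     for i in range(rp, -1, -1):
--         ch = s[i]
--         if ch == ')':
--             depth += 1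
--         elif ch == '(':
--             depth -= 1
--             if depth == 0:
--                 return (i, rp)
--     return (None, None)
-- ===== SOURCE B (Python) =====
-- def _find_param_span(sig: str) -> tuple[int, int] | tuple[None, None]:
--     """Forward scan with an explicit stack of '(' indices (standard bracket
--     matching) instead of A's backward depth counter."""
--     if not sig:
--         return (None, None)
--     s = sig.strip()
--     rp = s.rfind(')')
--     if rp == -1:
--         return (None, None)
--     stack = []
--     for i, ch in enumerate(s):
--         if ch == '(':
--             stack.append(i)
--         elif ch == ')':
--             if i == rp:
--                 return (stack.pop(), rp) if stack else (None, None)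
--             if stack:
--                 stack.pop()
--     return (None, None)
-- ===== Notes on version B (the rewrite author's own statement) =====
-- stated objective: alternative
-- what changed: Replaces A's backward walk from the last ')' with a decrementing depth counter by a single forward scan that keeps an explicit stack of '(' indices and answers when the scan reaches the last ')'.
import Mathlib
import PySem

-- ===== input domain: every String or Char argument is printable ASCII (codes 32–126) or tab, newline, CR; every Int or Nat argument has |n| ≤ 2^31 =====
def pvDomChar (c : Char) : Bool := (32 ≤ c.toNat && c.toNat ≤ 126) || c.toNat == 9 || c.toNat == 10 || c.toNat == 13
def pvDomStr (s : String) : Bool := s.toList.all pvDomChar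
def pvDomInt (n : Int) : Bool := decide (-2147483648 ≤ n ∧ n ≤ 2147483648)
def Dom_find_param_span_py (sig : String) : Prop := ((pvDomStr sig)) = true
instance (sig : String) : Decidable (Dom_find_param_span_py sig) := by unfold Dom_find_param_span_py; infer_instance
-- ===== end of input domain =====

-- B replaces A's backward depth-counting walk from the last ')' by one forward
-- scan with an explicit stack of '(' indices (standard bracket matching); same cost.

-- ===== PORT A =====
-- A's backward loop: for i in range(rp, -1, -1) with a depth counter; the early
-- return is encoded by structural recursion over the index list.
def aLoop (chars : List Char) (rp : Int) : List Int → Int → Option Int × Option Int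
  | [], _ => (none, none)
  | i :: rest, depth =>
    match PySem.List.pyGet? chars i with
    | none => (none, none)   -- unreachable: every i produced by range(rp,-1,-1) is in range
    | some ch =>
      if ch = ')' then aLoop chars rp rest (depth + 1)
      else if ch = '(' then
        if depth - 1 = 0 then (some i, some rp) else aLoop chars rp rest (depth - 1)
      else aLoop chars rp rest depth

def find_param_span_py (sig : String) : Option Int × Option Int :=
  if sig.toList.isEmpty then (none, none)
  else
    let s := PySem.Str.strip sig
    let rp := PySem.Str.rfind s ")"
    if rp = -1 then (none, none)
    else aLoop s.toList rp (PySem.List.pyRange rp (-1) (-1)) 0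

-- ===== PORT B =====
-- B's forward loop: for (i, ch) in enumerate(s), stack of '(' indices (head = top).
def bLoop (rp : Int) : List (Int × Char) → List Int → Option Int × Option Int
  | [], _ => (none, none)
  | (i, ch) :: rest, stack =>
    if ch = '(' then bLoop rp rest (i :: stack)
    else if ch = ')' then
      if i = rp then
        match stack with
        | t :: _ => (some t, some rp)
        | [] => (none, none)
      else
        match stack with
        | _ :: s' => bLoop rp rest s'
        | [] => bLoop rp rest []
    else bLoop rp rest stack

def find_param_span_py_alt (sig : String) : Option Int × Option Int :=
  if sig.toList.isEmpty then (none, none)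
  else
    let s := PySem.Str.strip sig
    let rp := PySem.Str.rfind s ")"
    if rp = -1 then (none, none)
    else bLoop rp (PySem.List.enumerate s.toList 0) []

-- ===== PRECONDITION & SPEC =====
def Spec_find_param_span_py (sig : String) (out : Option Int × Option Int) : Prop := out = find_param_span_py_alt sig
instance (sig : String) (out : Option Int × Option Int) : Decidable (Spec_find_param_span_py sig out) := by unfold Spec_find_param_span_py; infer_instance

-- ===== CLAIM (what is proved, stated in full; the proofs are below) =====
def Claim_equal_find_param_span_py : Prop := ∀ (sig : String), Dom_find_param_span_py sig → Spec_find_param_span_py sig (find_param_span_py sig)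

-- ===== LEMMAS AND PROOFS =====

def fwdStk : List (Int × Char) → List Int → List Int
  | [], st => st
  | (i, c) :: rest, st =>
      fwdStk rest (if c = '(' then i :: st else if c = ')' then st.tail else st)

def optOut (rp : Int) : Option Int → Option Int × Option Int
  | some t => (some t, some rp)
  | none => (none, none)

theorem bLoop_eq_stack (rp : Int) (pre post : List (Int × Char)) (st : List Int)
    (hpre : ∀ p ∈ pre, p.1 ≠ rp) :
    bLoop rp (pre ++ (rp, ')') :: post) st = optOut rp (fwdStk pre st).head? := by
  induction pre generalizing st with
  | nil =>
    cases st <;> simp [bLoop, fwdStk, optOut]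
  | cons p rest ih =>
    obtain ⟨i, c⟩ := p
    have hi : i ≠ rp := hpre (i, c) (by simp)
    have ih' := fun st => ih st (fun q hq => hpre q (by simp [hq]))
    by_cases h1 : c = '('
    · simp [bLoop, fwdStk, h1, ih']
    · by_cases h2 : c = ')'
      · cases st <;> simp [bLoop, fwdStk, h1, h2, hi, ih']
      · simp [bLoop, fwdStk, h1, h2, ih']

theorem rfind_go_close (cs : List Char) (i : Nat) :
    PySem.Chars.rfind.go cs [')'] i = -1 ∨
      ∃ n : Nat, PySem.Chars.rfind.go cs [')'] i = (n : Int) ∧ cs[n]? = some ')' := by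
  induction i with
  | zero =>
    rw [PySem.Chars.rfind.go]
    by_cases h : [')'].isPrefixOf cs
    · right; refine ⟨0, by simp [h], ?_⟩
      cases cs with
      | nil => simp [List.isPrefixOf] at h
      | cons a t =>
        simp [List.isPrefixOf] at h
        simp [← h]
    · left; simp [h]
  | succ j ih =>
    rw [PySem.Chars.rfind.go]
    by_cases h : [')'].isPrefixOf (cs.drop (j+1))
    · right; refine ⟨j+1, by simp [h], ?_⟩
      rcases hd : cs.drop (j+1) with _ | ⟨a, t⟩
      · rw [hd] at h; simp [List.isPrefixOf] at h
      · rw [hd] at h; simp [List.isPrefixOf] at h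
        have : cs[j+1]? = (cs.drop (j+1))[0]? := by simp
        rw [this, hd]; simp [← h]
    · simpa [h] using ih

theorem fwdStk_append (l1 l2 : List (Int × Char)) (st : List Int) :
    fwdStk (l1 ++ l2) st = fwdStk l2 (fwdStk l1 st) := by
  induction l1 generalizing st with
  | nil => rfl
  | cons p rest ih => cases p; simp [fwdStk, ih]

theorem aLoop_eq_stack (cs : List Char) (rp : Int) (k d : Nat) (hk : k ≤ cs.length) :
    aLoop cs rp (PySem.List.pyRange ((k : Int) - 1) (-1) (-1)) ((d : Int) + 1) =
      optOut rp ((fwdStk (PySem.List.enumerate (cs.take k) 0) [])[d]?) := by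
  induction k generalizing d with
  | zero =>
    rw [PySem.List.pyRange_neg_one_eq_nil (by omega)]
    simp [aLoop, fwdStk, optOut]
  | succ k ih =>
    have hk' : k < cs.length := by omega
    have hcons : PySem.List.pyRange (((k : Nat) + 1 : Int) - 1) (-1) (-1)
        = (k : Int) :: PySem.List.pyRange ((k : Int) - 1) (-1) (-1) := by
      have := PySem.List.pyRange_neg_one_cons (a := (k : Int)) (b := -1) (by omega)
      simpa using this
    have htake : cs.take (k+1) = cs.take k ++ [cs[k]] := by
      rw [List.take_succ]; simp [List.getElem?_eq_getElem hk']
    have hlen : (cs.take k).length = k := by simp [hk'.le]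
    have henum : PySem.List.enumerate (cs.take (k+1)) 0
        = PySem.List.enumerate (cs.take k) 0 ++ [((k : Int), cs[k])] := by
      rw [htake, PySem.List.enumerate_append]
      simp [hlen, PySem.List.enumerate_cons, PySem.List.enumerate_nil]
    have hget : PySem.List.pyGet? cs ((k : Nat) : Int) = some cs[k] := by
      rw [PySem.List.pyGet?_natCast]; simp [List.getElem?_eq_getElem hk']
    push_cast
    rw [hcons]
    rw [henum, fwdStk_append]
    by_cases h1 : cs[k] = ')'
    · have hd1 : ((d : Int) + 1) + 1 = ((d + 1 : Nat) : Int) + 1 := by push_cast; ring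
      simp only [aLoop, hget, h1, if_pos rfl, hd1]
      rw [ih (d+1) hk'.le]
      simp [fwdStk, h1, optOut, List.getElem?_tail]
    · by_cases h2 : cs[k] = '('
      · have hne : (('(' : Char) = ')') = False := by simp
        simp only [aLoop, hget, h2, hne, if_false, eq_self_iff_true, if_true]
        rcases d with _ | m
        · norm_num [fwdStk, optOut]
        · have hcast : ((m + 1 : Nat) : Int) + 1 - 1 = ((m : Nat) : Int) + 1 := by push_cast; ring
          rw [if_neg (by push_cast; omega), hcast, ih m hk'.le]
          simp [fwdStk]
      · simp only [aLoop, hget, if_neg (by simpa using h1), if_neg (by simpa using h2)]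
        rw [ih d hk'.le]
        simp [fwdStk, h1, h2]

theorem rfind_close (cs : List Char) :
    PySem.Chars.rfind cs [')'] = -1 ∨
      ∃ n : Nat, PySem.Chars.rfind cs [')'] = (n : Int) ∧ cs[n]? = some ')' := by
  exact rfind_go_close cs cs.length

theorem core_eq (cs : List Char) (n : Nat) (hn : cs[n]? = some ')') :
    aLoop cs (n : Int) (PySem.List.pyRange (n : Int) (-1) (-1)) 0 =
      bLoop (n : Int) (PySem.List.enumerate cs 0) [] := by
  have hlt : n < cs.length := by
    by_contra h
    rw [List.getElem?_eq_none (by omega)] at hn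
    simp at hn
  have hcons : PySem.List.pyRange (n : Int) (-1) (-1)
      = (n : Int) :: PySem.List.pyRange ((n : Int) - 1) (-1) (-1) :=
    PySem.List.pyRange_neg_one_cons (by omega)
  have hget : PySem.List.pyGet? cs ((n : Nat) : Int) = some ')' := by
    rw [PySem.List.pyGet?_natCast]; exact hn
  have h01 : (0 : Int) + 1 = ((0 : Nat) : Int) + 1 := by norm_num
  have hA : aLoop cs (n : Int) (PySem.List.pyRange (n : Int) (-1) (-1)) 0
      = optOut (n : Int) ((fwdStk (PySem.List.enumerate (cs.take n) 0) [])[0]?) := by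
    rw [hcons]
    simp only [aLoop, hget, eq_self_iff_true, if_true]
    rw [h01, aLoop_eq_stack cs (n : Int) n 0 hlt.le]
  have hsplit : cs = cs.take n ++ ')' :: cs.drop (n + 1) := by
    conv_lhs => rw [← List.take_append_drop n cs]
    congr 1
    rw [List.drop_eq_getElem_cons hlt]
    simp_all
  have hlen : (cs.take n).length = n := by simp [hlt.le]
  have henum : PySem.List.enumerate cs 0
      = PySem.List.enumerate (cs.take n) 0 ++ ((n : Int), ')') :: PySem.List.enumerate (cs.drop (n+1)) ((n : Int) + 1) := by
    conv_lhs => rw [hsplit]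
    rw [PySem.List.enumerate_append]
    simp [hlen, PySem.List.enumerate_cons]
  have hB : bLoop (n : Int) (PySem.List.enumerate cs 0) []
      = optOut (n : Int) (fwdStk (PySem.List.enumerate (cs.take n) 0) []).head? := by
    rw [henum]
    apply bLoop_eq_stack
    intro p hp
    rw [PySem.List.mem_enumerate_iff] at hp
    obtain ⟨k, hk, rfl⟩ := hp
    have : k < n := by omega
    simp
    omega
  rw [hA, hB]
  cases fwdStk (PySem.List.enumerate (cs.take n) 0) [] <;> simp

theorem ports_eq (sig : String) : find_param_span_py sig = find_param_span_py_alt sig := by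
  unfold find_param_span_py find_param_span_py_alt
  cases he : sig.toList.isEmpty
  · have hl : (")" : String).toList = [')'] := by decide
    simp only [he, Bool.false_eq_true, if_false, PySem.Str.rfind_eq, PySem.Str.toList_strip, hl]
    rcases rfind_close (PySem.Chars.strip sig.toList) with hneg | ⟨n, hrp, hn⟩
    · rw [hneg]; simp
    · rw [hrp]
      rw [if_neg (by omega), if_neg (by omega)]
      exact core_eq _ n hn
  · simp [he]

-- ===== VERDICT (by name: the statement is the Claim_ definition above) =====
theorem find_param_span_py_spec : Claim_equal_find_param_span_py := by
  intro sig _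
  unfold Spec_find_param_span_py
  exact ports_eq sig
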